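-- pv_equiv track=rewrite | github.com/poqdiam/blacksite | scripts/xylok_scrape_controls.py | _slice_section
-- ===== SOURCE A (Python) =====
-- from typing import Dict, List, Optional, Set, Tuple
--
-- def _slice_section(lines: List[str], start_idx: int, end_markers: Set[str]) -> Tuple[str, int]:
--     buf: List[str] = []
--     i = start_idx
--     while i < len(lines):
--         ln = lines[i]
--         if ln in end_markers:
--             break
--         buf.append(ln)
--         i += 1
--     return "\n".join(buf).strip(), i
-- ===== SOURCE B (Python) =====
-- def _slice_section(lines, start_idx, end_markers):
--     # Staged passes over the tail: collect every marker position in it,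
--     # take the smallest (default: the whole tail), then join that prefix.
--     tail = lines[start_idx:]
--     cuts = [j for j, ln in enumerate(tail) if ln in end_markers]
--     k = min(cuts, default=len(tail))
--     return "\n".join(tail[:k]).strip(), start_idx + k
-- ===== Notes on version B (the rewrite author's own statement) =====
-- stated objective: alternative
-- what changed: A scans forward from start_idx with an early-exit while-loop appending each line to a buffer; B slices off the tail, collects ALL marker positions in it in one full pass, takes their minimum (default: the tail length), and joins that prefix. Pre_ excludes negative start_idx, where A either raises IndexError (start_idx < -len(lines)) or its negative-index wraparound duplicates trailing lines, an accident of the implementation.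
-- outside the precondition, e.g. on _slice_section(['a', 'b'], -1, set()): A returns ('b\na\nb', 2), B returns ('b', 0)
import Mathlib
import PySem

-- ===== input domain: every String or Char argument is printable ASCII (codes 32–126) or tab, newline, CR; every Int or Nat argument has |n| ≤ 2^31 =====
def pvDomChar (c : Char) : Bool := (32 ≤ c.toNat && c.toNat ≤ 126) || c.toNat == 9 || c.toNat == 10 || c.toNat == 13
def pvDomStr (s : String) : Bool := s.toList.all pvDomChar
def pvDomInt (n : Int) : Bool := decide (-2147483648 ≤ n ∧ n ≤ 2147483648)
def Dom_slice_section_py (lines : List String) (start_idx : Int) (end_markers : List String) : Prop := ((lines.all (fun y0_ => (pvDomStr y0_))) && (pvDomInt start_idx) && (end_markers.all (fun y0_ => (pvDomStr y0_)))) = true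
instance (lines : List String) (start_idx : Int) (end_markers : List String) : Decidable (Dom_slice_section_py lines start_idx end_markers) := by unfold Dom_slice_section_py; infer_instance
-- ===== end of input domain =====

-- B replaces A's early-exit append-to-buffer while-loop by staged passes over the tail slice (collect all marker positions, take the minimum, join that prefix); same cost, different algorithm.


-- ===== PORT A =====
-- A's while-loop: append each non-marker line to buf, advancing i.
def pvSliceLoopA (lines : List String) (end_markers : List String) (buf : List String) (i : Int) :
    List String × Int :=
  if _h : i < (lines.length : Int) then
    match PySem.List.pyGet? lines i with
    | some ln =>
        if end_markers.contains ln then (buf, i)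
        else pvSliceLoopA lines end_markers (buf ++ [ln]) (i + 1)
    | none => (buf, i)   -- Python raises IndexError here (negative i past the front); excluded by Pre_
  else (buf, i)
termination_by ((lines.length : Int) - i).toNat
decreasing_by omega

def slice_section_py (lines : List String) (start_idx : Int) (end_markers : List String) : String × Int :=
  let r := pvSliceLoopA lines end_markers [] start_idx
  (PySem.Str.strip (PySem.Str.join "\n" r.1), r.2)

-- ===== PORT B =====
-- Source B's comprehension: [j for j, ln in enumerate(tail) if ln in end_markers]
def pvCutsB (end_markers : List String) (tail : List String) : List Int :=
  ((PySem.List.enumerate tail 0).filter (fun p => end_markers.contains p.2)).map (fun p => p.1)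

def slice_section_py_alt (lines : List String) (start_idx : Int) (end_markers : List String) : String × Int :=
  let tail := PySem.List.slice lines (some start_idx) none
  let k := (PySem.List.min? (pvCutsB end_markers tail) (fun x => x)).getD (tail.length : Int)
  (PySem.Str.strip (PySem.Str.join "\n" (PySem.List.slice tail none (some k))), start_idx + k)

-- ===== PRECONDITION & SPEC =====
-- Pre_ restricts to the natural domain 0 ≤ start_idx: for start_idx < -len(lines) A raises
-- IndexError, and for -len(lines) ≤ start_idx < 0 A's negative-index wraparound re-reads trailing
-- lines and then restarts from index 0, an accident of the implementation; B simply slices there.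
def Pre_slice_section_py (lines : List String) (start_idx : Int) (end_markers : List String) : Prop :=
  0 ≤ start_idx
instance (lines : List String) (start_idx : Int) (end_markers : List String) : Decidable (Pre_slice_section_py lines start_idx end_markers) := by unfold Pre_slice_section_py; infer_instance

def pvWitness_slice_section_py : List String × Int × List String := (["a", "b", "END"], 0, ["END"])

def Spec_slice_section_py (lines : List String) (start_idx : Int) (end_markers : List String) (out : String × Int) : Prop := out = slice_section_py_alt lines start_idx end_markers
instance (lines : List String) (start_idx : Int) (end_markers : List String) (out : String × Int) : Decidable (Spec_slice_section_py lines start_idx end_markers out) := by unfold Spec_slice_section_py; infer_instance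

-- ===== CLAIM (what is proved, stated in full; the proofs are below) =====
def Claim_equal_slice_section_py : Prop := ∀ (lines : List String) (start_idx : Int) (end_markers : List String), Dom_slice_section_py lines start_idx end_markers → Pre_slice_section_py lines start_idx end_markers → Spec_slice_section_py lines start_idx end_markers (slice_section_py lines start_idx end_markers)

-- ===== LEMMAS AND PROOFS =====

-- all indices produced by enumerate are at least the start value
lemma fst_enumerate_ge {α : Type} {t : List α} {s : Int} {p : Int × α}
    (hp : p ∈ PySem.List.enumerate t s) : s ≤ p.1 := by
  rw [PySem.List.mem_enumerate_iff] at hp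
  obtain ⟨k, hk, rfl⟩ := hp
  simp only
  omega

lemma foldl_min_eq_self {l : List Int} {s : Int} (h : ∀ x ∈ l, s ≤ x) :
    l.foldl min s = s := by
  induction l with
  | nil => rfl
  | cons y t ih =>
      simp only [List.foldl_cons]
      rw [min_eq_left (h y (by simp))]
      exact ih (fun x hx => h x (by simp [hx]))

-- B's minimum-of-all-marker-positions (with default) IS the first-marker index
lemma min_cuts_eq_findIdx (em : List String) (t : List String) : ∀ s : Int,
    ((PySem.List.min?
        (((PySem.List.enumerate t s).filter (fun p => em.contains p.2)).map (fun p => p.1))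
        (fun x => x)).getD (s + (t.length : Int)))
      = s + (t.findIdx (fun ln => em.contains ln) : Int) := by
  induction t with
  | nil => intro s; simp [PySem.List.enumerate_nil, PySem.List.min?]
  | cons x t ih =>
      intro s
      rw [PySem.List.enumerate_cons]
      by_cases hx : em.contains x
      · simp only [List.filter_cons, hx, if_pos, List.map_cons]
        rw [PySem.List.min?_id_cons]
        have hge : ∀ y ∈ (((PySem.List.enumerate t (s + 1)).filter
            (fun p => em.contains p.2)).map (fun p => p.1)), s ≤ y := by
          intro y hy
          simp only [List.mem_map, List.mem_filter] at hy
          obtain ⟨p, ⟨hp, _⟩, rfl⟩ := hy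
          have := fst_enumerate_ge hp
          omega
        rw [foldl_min_eq_self hge]
        have hx' : x ∈ em := by simpa using hx
        simp [List.findIdx_cons, hx']
      · have hx' : x ∉ em := by simpa using hx
        simp only [List.filter_cons]
        rw [if_neg (by simp [hx'])]
        have h1 : s + ((x :: t).length : Int) = (s + 1) + (t.length : Int) := by
          simp; omega
        rw [h1, ih (s + 1)]
        have h2 : (x :: t).findIdx (fun ln => em.contains ln)
            = t.findIdx (fun ln => em.contains ln) + 1 := by
          simp [List.findIdx_cons, hx']
        rw [h2]
        push_cast
        omega

-- A's loop result in terms of the first-marker index of the remaining tail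
lemma pvLoop_eq (lines em buf : List String) (i : Int) (hi : 0 ≤ i) :
    pvSliceLoopA lines em buf i =
      (buf ++ (lines.drop i.toNat).take ((lines.drop i.toNat).findIdx (fun ln => em.contains ln)),
       i + ((lines.drop i.toNat).findIdx (fun ln => em.contains ln) : Int)) := by
  unfold pvSliceLoopA
  by_cases h : i < (lines.length : Int)
  · have hidx : i.toNat < lines.length := by omega
    have hget : PySem.List.pyGet? lines i = some lines[i.toNat] :=
      PySem.List.pyGet?_eq_some_getElem lines hi h
    have hdrop : lines.drop i.toNat = lines[i.toNat] :: lines.drop (i.toNat + 1) :=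
      List.drop_eq_getElem_cons hidx
    simp only [h, dif_pos, hget]
    by_cases hc : em.contains lines[i.toNat]
    · simp only [hc, if_pos, hdrop, List.findIdx_cons, cond_true]
      simp
    · simp only [hc, Bool.false_eq_true, if_neg, not_false_iff]
      rw [pvLoop_eq lines em (buf ++ [lines[i.toNat]]) (i + 1) (by omega)]
      have hIt : (i + 1).toNat = i.toNat + 1 := by omega
      rw [hIt, hdrop]
      simp only [List.findIdx_cons, hc, cond_false, List.take_succ_cons]
      simp only [Prod.mk.injEq]
      exact ⟨by simp, by push_cast; omega⟩
  · have hdrop : lines.drop i.toNat = [] := List.drop_eq_nil_of_le (by omega)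
    simp only [h, dif_neg, not_false_iff, hdrop, List.findIdx_nil]
    simp
termination_by ((lines.length : Int) - i).toNat
decreasing_by omega

lemma min_pvCutsB (em t : List String) :
    (PySem.List.min? (pvCutsB em t) (fun x => x)).getD (t.length : Int)
      = ((t.findIdx (fun ln => em.contains ln) : Nat) : Int) := by
  have h := min_cuts_eq_findIdx em t 0
  unfold pvCutsB
  simpa using h

-- ===== VERDICT (by name: the statement is the Claim_ definition above) =====
theorem slice_section_py_spec : Claim_equal_slice_section_py := by
  intro lines start_idx em _ hpre
  unfold Spec_slice_section_py slice_section_py slice_section_py_alt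
  rw [pvLoop_eq lines em [] start_idx hpre]
  simp only [PySem.List.slice_from lines hpre, min_pvCutsB]
  rw [PySem.List.slice_to _ (by exact_mod_cast Int.natCast_nonneg _)]
  simp
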